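-- pv_equiv track=rewrite | github.com/Toloc11/fantasy-baseball-scout | fantasy-baseball-pro/main.py | _parse_query_hints
-- ===== SOURCE A (Python) =====
-- def _parse_query_hints(raw_query: str):
--     pos_aliases = {
--         "rp": "RP",
--         "reliever": "RP",
--         "closer": "RP",
--         "sp": "SP",
--         "starter": "SP",
--         "c": "C",
--         "catcher": "C",
--         "1b": "1B",
--         "2b": "2B",
--         "3b": "3B",
--         "ss": "SS",
--         "lf": "LF",
--         "cf": "CF",
--         "rf": "RF",
--         "of": "OF",
--         "dh": "DH",
--     }
--
--     parts = [p for p in raw_query.split() if p]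
--     cleaned = []
--     prefer_pos = None
--     for token in parts:
--         t = token.lower()
--         if t in pos_aliases and prefer_pos is None:
--             prefer_pos = pos_aliases[t]
--         else:
--             cleaned.append(token)
--     nombre = " ".join(cleaned).strip().lower()
--     return nombre, prefer_pos
-- ===== SOURCE B (Python) =====
-- def _parse_query_hints(raw_query: str):
--     pos_aliases = {
--         "rp": "RP",
--         "reliever": "RP",
--         "closer": "RP",
--         "sp": "SP",
--         "starter": "SP",
--         "c": "C",
--         "catcher": "C",
--         "1b": "1B",
--         "2b": "2B",
--         "3b": "3B",
--         "ss": "SS",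
--         "lf": "LF",
--         "cf": "CF",
--         "rf": "RF",
--         "of": "OF",
--         "dh": "DH",
--     }
--     # Scan the 16 alias KEYS (not the tokens): for each key, locate its first
--     # occurrence among the lowered tokens and keep the key with the smallest
--     # index; distinct keys occupy distinct indices, so the minimum is unique.
--     parts = [p for p in raw_query.split() if p]
--     low = [p.lower() for p in parts]
--     best_i = None
--     best_pos = None
--     for key, pos in pos_aliases.items():
--         try:
--             i = low.index(key)
--         except ValueError:
--             continue
--         if best_i is None or i < best_i:
--             best_i, best_pos = i, pos
--     if best_i is None:
--         cleaned = parts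
--     else:
--         cleaned = parts[:best_i] + parts[best_i + 1:]
--     return " ".join(cleaned).strip().lower(), best_pos
-- ===== Notes on version B (the rewrite author's own statement) =====
-- stated objective: alternative
-- what changed: Instead of scanning tokens against the alias dict, B iterates over the 16 alias KEYS, finds each key's first occurrence among the lowered tokens with list.index, keeps the key with the minimal index (unique since distinct keys occupy distinct indices), and excises that single index with slices.
import Mathlib
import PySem

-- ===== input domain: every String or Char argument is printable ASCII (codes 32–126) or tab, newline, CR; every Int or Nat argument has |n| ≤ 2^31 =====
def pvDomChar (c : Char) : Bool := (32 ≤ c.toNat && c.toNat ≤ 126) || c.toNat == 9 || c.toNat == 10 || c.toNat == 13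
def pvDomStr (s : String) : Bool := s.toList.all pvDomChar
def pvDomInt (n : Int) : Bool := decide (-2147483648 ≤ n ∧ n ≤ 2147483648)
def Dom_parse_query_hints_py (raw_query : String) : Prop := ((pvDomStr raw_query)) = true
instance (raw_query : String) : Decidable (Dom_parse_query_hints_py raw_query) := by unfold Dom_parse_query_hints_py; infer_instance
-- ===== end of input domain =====

-- B scans the 16 alias keys (list.index per key, keep the minimal index) instead of scanning
-- tokens against the dict; objective: alternative algorithm, same result.

-- the pos_aliases dict literal (shared constant data of both programs)
def pvPosAliases : PySem.Dict String String := PySem.Dict.ofList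
  [("rp", "RP"), ("reliever", "RP"), ("closer", "RP"), ("sp", "SP"), ("starter", "SP"),
   ("c", "C"), ("catcher", "C"), ("1b", "1B"), ("2b", "2B"), ("3b", "3B"), ("ss", "SS"),
   ("lf", "LF"), ("cf", "CF"), ("rf", "RF"), ("of", "OF"), ("dh", "DH")]

-- ===== PORT A =====
-- the for-loop of A: state (cleaned, prefer_pos), branch order as in Python
def pqLoopA : List String → List String → Option String → List String × Option String
  | [], cleaned, prefer => (cleaned, prefer)
  | token :: rest, cleaned, prefer =>
    let t := PySem.Str.lower token
    if (PySem.Dict.get? pvPosAliases t).isSome ∧ prefer = none then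
      pqLoopA rest cleaned (PySem.Dict.get? pvPosAliases t)
    else
      pqLoopA rest (cleaned ++ [token]) prefer

def parse_query_hints_py (raw_query : String) : String × Option String :=
  let parts := (PySem.Str.split₀ raw_query).filter (fun p => p != "")
  let res := pqLoopA parts [] none
  (PySem.Str.lower (PySem.Str.strip (PySem.Str.join " " res.1)), res.2)

-- ===== PORT B =====
-- B's for-loop over the dict items: state (best_i, best_pos)
def pqStepB (low : List String) (b : Option Nat × Option String) (kv : String × String) :
    Option Nat × Option String :=
  match PySem.List.index? low kv.1 with
  | none => b            -- except ValueError: continue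
  | some i =>
    match b.1 with
    | none => (some i, some kv.2)
    | some j => if i < j then (some i, some kv.2) else b

def parse_query_hints_py_alt (raw_query : String) : String × Option String :=
  let parts := (PySem.Str.split₀ raw_query).filter (fun p => p != "")
  let low := parts.map PySem.Str.lower
  let best := (PySem.Dict.items pvPosAliases).foldl (pqStepB low) (none, none)
  let cleaned :=
    match best.1 with
    | none => parts
    | some i => PySem.List.slice parts none (some (i : Int)) ++
                PySem.List.slice parts (some ((i : Int) + 1)) none
  (PySem.Str.lower (PySem.Str.strip (PySem.Str.join " " cleaned)), best.2)

-- ===== PRECONDITION & SPEC =====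
def Spec_parse_query_hints_py (raw_query : String) (out : String × Option String) : Prop := out = parse_query_hints_py_alt raw_query
instance (raw_query : String) (out : String × Option String) : Decidable (Spec_parse_query_hints_py raw_query out) := by unfold Spec_parse_query_hints_py; infer_instance

-- ===== CLAIM (what is proved, stated in full; the proofs are below) =====
def Claim_equal_parse_query_hints_py : Prop := ∀ (raw_query : String), Dom_parse_query_hints_py raw_query → Spec_parse_query_hints_py raw_query (parse_query_hints_py raw_query)

-- ===== LEMMAS AND PROOFS =====

-- once prefer_pos is set, A's loop only appends the remaining tokens
lemma pqLoopA_some (parts : List String) : ∀ (cleaned : List String) (v : String),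
    pqLoopA parts cleaned (some v) = (cleaned ++ parts, some v) := by
  induction parts with
  | nil => simp [pqLoopA]
  | cons tok rest ih =>
      intro cleaned v
      simp [pqLoopA, ih]

-- characterisation of A's loop from the initial state, via the first alias index
lemma pqLoopA_none (parts : List String) : ∀ (cleaned : List String),
    pqLoopA parts cleaned none =
      match parts.findIdx? (fun t => (PySem.Dict.get? pvPosAliases (PySem.Str.lower t)).isSome) with
      | none => (cleaned ++ parts, none)
      | some i => (cleaned ++ (parts.take i ++ parts.drop (i + 1)),
                   PySem.Dict.get? pvPosAliases (PySem.Str.lower (parts.getD i ""))) := by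
  induction parts with
  | nil => simp [pqLoopA]
  | cons tok rest ih =>
      intro cleaned
      by_cases h : (PySem.Dict.get? pvPosAliases (PySem.Str.lower tok)).isSome
      · obtain ⟨v, hv⟩ := Option.isSome_iff_exists.mp h
        simp [pqLoopA, hv, pqLoopA_some, List.findIdx?_cons]
      · rw [pqLoopA]
        simp only [h]
        rw [ih]
        rw [List.findIdx?_cons]
        simp only [h]
        cases hr : rest.findIdx? (fun t => (PySem.Dict.get? pvPosAliases (PySem.Str.lower t)).isSome) with
        | none => simp
        | some j => simp [List.take_succ_cons, List.drop_succ_cons]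

-- the candidate list of B's key loop: (first index of key, value) for each key present
def pqCands (low : List String) : List (Nat × String) :=
  (PySem.Dict.items pvPosAliases).filterMap
    (fun kv => (PySem.List.index? low kv.1).map (fun i => (i, kv.2)))

def pqMin (b : Option Nat × Option String) (c : Nat × String) : Option Nat × Option String :=
  match b.1 with
  | none => (some c.1, some c.2)
  | some j => if c.1 < j then (some c.1, some c.2) else b

-- B's fold over items is the fold of pqMin over the candidate list
lemma pqFold_eq_cands (low : List String) (L : List (String × String)) :
    ∀ b, L.foldl (pqStepB low) b =
      (L.filterMap (fun kv => (PySem.List.index? low kv.1).map (fun i => (i, kv.2)))).foldl pqMin b := by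
  induction L with
  | nil => intro b; rfl
  | cons kv L ih =>
      intro b
      cases h : PySem.List.index? low kv.1 with
      | none =>
          rw [PySem.List.index?_eq_idxOf?] at h
          simp [List.foldl_cons, h, pqStepB, ih]
      | some i =>
          rw [PySem.List.index?_eq_idxOf?] at h
          simp [List.foldl_cons, h, pqStepB, pqMin, ih]

-- folding pqMin over candidates all ≥ w.1 (with w the unique one at w.1) yields w
lemma pqMin_fold (w : Nat × String) (cs : List (Nat × String)) :
    ∀ (b : Option Nat × Option String),
    (∀ c ∈ cs, w.1 ≤ c.1 ∧ (c.1 = w.1 → c = w)) →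
    (w ∈ cs ∨ b = (some w.1, some w.2)) →
    (b = (none, none) ∨ ∃ j v, b = (some j, some v) ∧ w.1 ≤ j ∧ (j = w.1 → (j, v) = w)) →
    cs.foldl pqMin b = (some w.1, some w.2) := by
  induction cs with
  | nil =>
      intro b _ hmem _
      rcases hmem with h | h
      · exact absurd h (List.not_mem_nil)
      · simpa using h
  | cons c cs ih =>
      intro b hbnd hmem hinv
      have hc := hbnd c (List.mem_cons_self)
      have hbnd' : ∀ c' ∈ cs, w.1 ≤ c'.1 ∧ (c'.1 = w.1 → c' = w) :=
        fun c' hc' => hbnd c' (List.mem_cons_of_mem _ hc')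
      rw [List.foldl_cons]
      rcases hmem with hmem | hb
      · rcases List.mem_cons.mp hmem with hcw | hwcs
        · -- c = w : the new state becomes (some w.1, some w.2)
          have hb' : pqMin b c = (some w.1, some w.2) := by
            rw [← hcw]
            rcases hinv with hb0 | ⟨j, v, hb, hle, hju⟩
            · simp [pqMin, hb0]
            · rcases Nat.lt_or_ge w.1 j with hlt | hge
              · simp [pqMin, hb, hlt]
              · have hji : j = w.1 := Nat.le_antisymm hge hle
                have hv := hju hji
                rw [hji] at hv
                have hveq : v = w.2 := by
                  have := congrArg Prod.snd hv; simpa using this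
                simp [pqMin, hb, hji, hveq]
          exact ih (pqMin b c) hbnd' (Or.inr hb') (Or.inr ⟨w.1, w.2, hb', le_refl _, fun _ => rfl⟩)
        · -- w further on; the state keeps the invariant
          refine ih (pqMin b c) hbnd' (Or.inl hwcs) ?_
          rcases hinv with hb0 | ⟨j, v, hb, hle, hju⟩
          · refine Or.inr ⟨c.1, c.2, by simp [pqMin, hb0], hc.1, fun h => by
              have := hc.2 h; simp [← this]⟩
          · by_cases hlt : c.1 < j
            · refine Or.inr ⟨c.1, c.2, by simp [pqMin, hb, hlt], hc.1, fun h => by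
                have := hc.2 h; simp [← this]⟩
            · refine Or.inr ⟨j, v, by simp [pqMin, hb, hlt], hle, hju⟩
      · -- state already equals w: it never changes
        have hb' : pqMin b c = (some w.1, some w.2) := by
          have : ¬ c.1 < w.1 := Nat.not_lt.mpr hc.1
          simp [pqMin, hb, this]
        exact ih (pqMin b c) hbnd' (Or.inr hb') (Or.inr ⟨w.1, w.2, hb', le_refl _, fun _ => rfl⟩)

lemma pvPosAliases_keys_nodup : (PySem.Dict.keys pvPosAliases).Nodup := by decide

-- characterisation of B's fold, via the first alias index in the lowered tokens
lemma pqFoldB_char (low : List String) :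
    (PySem.Dict.items pvPosAliases).foldl (pqStepB low) (none, none) =
      match low.findIdx? (fun t => (PySem.Dict.get? pvPosAliases t).isSome) with
      | none => (none, none)
      | some i => (some i, PySem.Dict.get? pvPosAliases (low.getD i "")) := by
  rw [pqFold_eq_cands]
  cases hf : low.findIdx? (fun t => (PySem.Dict.get? pvPosAliases t).isSome) with
  | none =>
      -- no token is a key, so every key is absent and the candidate list is empty
      have hnone : ∀ t ∈ low, (PySem.Dict.get? pvPosAliases t).isSome = false := by
        intro t ht
        have := List.findIdx?_eq_none_iff.mp hf t ht
        simpa using this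
      have : (PySem.Dict.items pvPosAliases).filterMap
          (fun kv => (PySem.List.index? low kv.1).map (fun i => (i, kv.2))) = [] := by
        rw [List.filterMap_eq_nil_iff]
        intro kv hkv
        have hget : PySem.Dict.get? pvPosAliases kv.1 = some kv.2 :=
          PySem.Dict.get?_of_mem_items _ (by simpa using hkv) pvPosAliases_keys_nodup
        have : kv.1 ∉ low := by
          intro hmem
          have := hnone kv.1 hmem
          simp [hget] at this
        simp [this]
      rw [this]
      rfl
  | some i =>
      obtain ⟨hi, hPi, hmin⟩ := List.findIdx?_eq_some_iff_getElem.mp hf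
      obtain ⟨v, hv⟩ := Option.isSome_iff_exists.mp hPi
      -- the first occurrence of low[i] is i itself
      have hidx : PySem.List.index? low low[i] = some i := by
        have hmemlow : low[i] ∈ low := List.getElem_mem hi
        obtain ⟨j, hj⟩ := Option.isSome_iff_exists.mp ((PySem.List.index?_isSome_iff _ _).mpr hmemlow)
        obtain ⟨hjlen, hjeq, hjfirst⟩ := PySem.List.getElem_of_index?_eq_some hj
        have hij : i ≤ j := by
          by_contra hij
          exact (by simpa [hjeq, hv] using hmin j (Nat.not_le.mp hij))
        have hji : ¬ i < j := fun hlt => hjfirst i hlt rfl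
        rw [hj, Nat.le_antisymm (Nat.not_lt.mp hji) hij]
      -- the winning candidate
      have hwmem : (i, v) ∈ pqCands low := by
        apply List.mem_filterMap.mpr
        refine ⟨(low[i], v), PySem.Dict.mem_items_of_get?_eq_some _ hv, ?_⟩
        rw [hidx]; rfl
      have hwbnd : ∀ c ∈ pqCands low, (i, v).1 ≤ c.1 ∧ (c.1 = (i, v).1 → c = (i, v)) := by
        intro c hcmem
        obtain ⟨kv, hkv, hcm⟩ := List.mem_filterMap.mp hcmem
        obtain ⟨j, hj, hje⟩ := Option.map_eq_some_iff.mp hcm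
        obtain ⟨hjlen, hjeq, _⟩ := PySem.List.getElem_of_index?_eq_some hj
        have hget : PySem.Dict.get? pvPosAliases kv.1 = some kv.2 :=
          PySem.Dict.get?_of_mem_items _ (by simpa using hkv) pvPosAliases_keys_nodup
        have hij : i ≤ j := by
          by_contra hij
          exact (by simpa [hjeq, hget] using hmin j (Nat.not_le.mp hij))
        constructor
        · simpa [← hje] using hij
        · intro hceq
          have hji : j = i := by simpa [← hje] using hceq
          subst hji
          have : kv.1 = low[j] := hjeq.symm
          rw [this] at hget
          rw [hget] at hv
          simp [← hje, Option.some_inj.mp hv]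
      have hfold := pqMin_fold (i, v) (pqCands low) (none, none) hwbnd (Or.inl hwmem) (Or.inl rfl)
      have hgetD' : low[i]?.getD "" = low[i] := by simp [List.getElem?_eq_getElem hi]
      simpa [pqCands, hgetD', hv] using hfold

-- ===== VERDICT (by name: the statement is the Claim_ definition above) =====
theorem parse_query_hints_py_spec : Claim_equal_parse_query_hints_py := by
  intro raw _
  unfold Spec_parse_query_hints_py parse_query_hints_py parse_query_hints_py_alt
  simp only [pqLoopA_none, pqFoldB_char, List.findIdx?_map, Function.comp_def]
  cases hr : ((PySem.Str.split₀ raw).filter (fun p => p != "")).findIdx?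
      (fun t => (PySem.Dict.get? pvPosAliases (PySem.Str.lower t)).isSome) with
  | none => simp
  | some i =>
      obtain ⟨hi, _, _⟩ := List.findIdx?_eq_some_iff_getElem.mp hr
      have h2 : ((PySem.Str.split₀ raw).filter (fun p => p != ""))[i]? =
          some ((PySem.Str.split₀ raw).filter (fun p => p != ""))[i] :=
        List.getElem?_eq_getElem hi
      simp [PySem.List.slice_to_natCast, h2]
      rw [show ((i : Int) + 1) = ((i + 1 : Nat) : Int) by push_cast; ring,
          PySem.List.slice_from_natCast]
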